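-- pv_equiv track=rewrite | github.com/karlotness/adrt | tests/test_adrt.py | _gen_dline
-- ===== SOURCE A (Python) =====
-- def _gen_dline(n, h, ds):
--     if n == 1:
--         return {(0, h)}
--     if ds % 2 == 0:
--         s = ds // 2
--         a = _gen_dline(n // 2, h, s)
--         b = _gen_dline(n // 2, h + s, s)
--     else:
--         s = (ds - 1) // 2
--         a = _gen_dline(n // 2, h, s)
--         b = _gen_dline(n // 2, h + s + 1, s)
--     b = {(i + (n // 2), j) for i, j in b}
--     return a.union(b)
-- ===== SOURCE B (Python) =====
-- def _gen_dline(n, h, ds):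
--     # Iterative reformulation of the recursion: all calls at one depth share n
--     # and ds (only h differs), so one loop precomputes the per-depth (shift,
--     # rise) parameters, one doubling pass lists every leaf height, and a single
--     # stack-driven sweep over the leaves merges sibling blocks bottom-up.
--     params = []
--     m, d = n, ds
--     while m > 1:
--         params.append((m // 2, -(-d // 2)))  # (index shift, height rise of the right half)
--         m //= 2
--         d //= 2
--     if not params:
--         return {(0, h)}
--     hs = [h]
--     for _, rise in params:
--         hs = [x for v in hs for x in (v, v + rise)]
--     bottom = params[-1][0]
--     L = len(params) - 1
--     stack = []
--     it = iter(hs)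
--     for va in it:
--         node = {(0, va)}.union({(bottom, next(it))})
--         depth = L
--         while stack and stack[-1][0] == depth:
--             _, a = stack.pop()
--             depth -= 1
--             half = params[depth][0]
--             node = a.union({(i + half, j) for i, j in node})
--         stack.append((depth, node))
--     return stack[0][1]
-- ===== Notes on version B (the rewrite author's own statement) =====
-- stated objective: alternative
-- what changed: Replaced the top-down divide-and-conquer recursion by an iterative three-pass pipeline: one loop computing the per-depth (shift, rise) parameters (all recursive calls at a depth share n and ds, only h differs), one level-doubling pass producing every leaf height at once, and one bottom-up pass merging neighbouring blocks pairwise.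
import Mathlib
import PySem

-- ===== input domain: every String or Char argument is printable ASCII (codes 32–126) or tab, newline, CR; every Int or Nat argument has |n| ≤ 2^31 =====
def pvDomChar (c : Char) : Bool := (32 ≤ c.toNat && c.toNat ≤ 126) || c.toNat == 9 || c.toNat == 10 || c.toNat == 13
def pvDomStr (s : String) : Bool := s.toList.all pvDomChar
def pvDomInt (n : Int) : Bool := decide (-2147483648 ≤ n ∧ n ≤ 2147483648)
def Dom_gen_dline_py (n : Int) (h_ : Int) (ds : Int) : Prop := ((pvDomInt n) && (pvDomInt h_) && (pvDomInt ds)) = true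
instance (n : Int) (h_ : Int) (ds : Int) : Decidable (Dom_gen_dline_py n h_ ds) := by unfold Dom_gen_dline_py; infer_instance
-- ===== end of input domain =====

-- B replaces the top-down recursion by an iterative pipeline (per-depth parameters, one
-- leaf-height doubling pass, one stack-driven bottom-up merge sweep); same cost, no recursion.
-- Return value only (neither version mutates its arguments).

-- ===== PORT A =====
-- fueled transliteration of the recursion; fuel n.toNat suffices for every n ≥ 1
-- (each call at least halves n), and fuel 0 is only reached where Python recurses forever.
def genDlineA : Nat → Int → Int → Int → List (Int × Int)
  | 0, _, _, _ => []
  | fuel+1, n, h, ds =>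
    if n = 1 then [(0, h)]
    else if PySem.Int.mod ds 2 = 0 then
      let s := PySem.Int.floordiv ds 2
      let a := genDlineA fuel (PySem.Int.floordiv n 2) h s
      let b := genDlineA fuel (PySem.Int.floordiv n 2) (h + s) s
      PySem.Set.union a (PySem.Set.ofList (b.map (fun p => (p.1 + PySem.Int.floordiv n 2, p.2))))
    else
      let s := PySem.Int.floordiv (ds - 1) 2
      let a := genDlineA fuel (PySem.Int.floordiv n 2) h s
      let b := genDlineA fuel (PySem.Int.floordiv n 2) (h + s + 1) s
      PySem.Set.union a (PySem.Set.ofList (b.map (fun p => (p.1 + PySem.Int.floordiv n 2, p.2))))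

def gen_dline_py (n : Int) (h_ : Int) (ds : Int) : List (Int × Int) :=
  genDlineA n.toNat n h_ ds

-- ===== PORT B =====
-- Source B's while loop computing the per-depth (shift, rise) parameters; fuel n.toNat
-- suffices (m at least halves each pass)
def genParams : Nat → Int → Int → List (Int × Int)
  | 0, _, _ => []
  | fuel+1, m, d =>
    if 1 < m then
      (PySem.Int.floordiv m 2, -(PySem.Int.floordiv (-d) 2))
        :: genParams fuel (PySem.Int.floordiv m 2) (PySem.Int.floordiv d 2)
    else []

-- Source B's 'for _, rise in params: hs = [x for v in hs for x in (v, v + rise)]'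
def expandHs (params : List (Int × Int)) (hs : List Int) : List Int :=
  params.foldl (fun acc pr => acc.flatMap (fun v => [v, v + pr.2])) hs

-- Source B's inner 'while stack and stack[-1][0] == depth: …' followed by the append;
-- the stack's top is this list's HEAD; 'params[depth]' is exact via getD because
-- depth < len(params) whenever the while body runs
def collapseB (params : List (Int × Int)) :
    List (Nat × List (Int × Int)) → Nat → List (Int × Int) → List (Nat × List (Int × Int))
  | [], depth, node => [(depth, node)]
  | (d, a) :: stk, depth, node =>
    if d = depth then
      collapseB params stk (depth - 1)
        (PySem.Set.union a (PySem.Set.ofList (node.map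
          (fun p => (p.1 + (params.getD (depth - 1) ((0 : Int), (0 : Int))).1, p.2)))))
    else (depth, node) :: (d, a) :: stk

-- Source B's 'for va in it: node = {(0, va)}.union({(bottom, next(it))}); …' over the
-- leaf heights, two at a time
def dlineLoopB (params : List (Int × Int)) (bottom : Int) (L : Nat) :
    List Int → List (Nat × List (Int × Int)) → List (Nat × List (Int × Int))
  | va :: vb :: rest, stack =>
    dlineLoopB params bottom L rest
      (collapseB params stack L (PySem.Set.union [((0 : Int), va)] [(bottom, vb)]))
  | _, stack => stack

def gen_dline_py_alt (n : Int) (h_ : Int) (ds : Int) : List (Int × Int) :=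
  let params := genParams n.toNat n ds
  if params = [] then [(0, h_)]
  else
    let hs := expandHs params [h_]
    let bottom := (params.getLastD ((0 : Int), (0 : Int))).1  -- params[-1][0]: exact, params ≠ []
    match dlineLoopB params bottom (params.length - 1) hs [] with
    | (_, s) :: _ => s
    | [] => []  -- unreachable (Python's stack[0][1]: the stack ends nonempty)

-- ===== PRECONDITION & SPEC =====
-- Pre_ excludes n ≤ 0, where Python A recurses forever (RecursionError): n // 2 no longer shrinks.
def Pre_gen_dline_py (n : Int) (h_ : Int) (ds : Int) : Prop := 1 ≤ n
instance (n : Int) (h_ : Int) (ds : Int) : Decidable (Pre_gen_dline_py n h_ ds) := by unfold Pre_gen_dline_py; infer_instance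
def pvWitness_gen_dline_py : Int × Int × Int := (6, 2, -5)

def Spec_gen_dline_py (n : Int) (h_ : Int) (ds : Int) (out : List (Int × Int)) : Prop := out = gen_dline_py_alt n h_ ds
instance (n : Int) (h_ : Int) (ds : Int) (out : List (Int × Int)) : Decidable (Spec_gen_dline_py n h_ ds out) := by unfold Spec_gen_dline_py; infer_instance

-- ===== CLAIM (what is proved, stated in full; the proofs are below) =====
def Claim_equal_gen_dline_py : Prop := ∀ (n : Int) (h_ : Int) (ds : Int), Dom_gen_dline_py n h_ ds → Pre_gen_dline_py n h_ ds → Spec_gen_dline_py n h_ ds (gen_dline_py n h_ ds)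

-- ===== LEMMAS AND PROOFS =====

theorem update_eq_append {α : Type} [BEq α] [LawfulBEq α] (s xs : List α)
    (h : (s ++ xs).Nodup) : PySem.Set.update s xs = s ++ xs := by
  induction xs generalizing s with
  | nil => simp [PySem.Set.update]
  | cons x xs ih =>
    have hx : x ∉ s := by
      intro hmem
      exact (List.disjoint_of_nodup_append h hmem) (by simp)
    have hadd : PySem.Set.add s x = s ++ [x] := by
      simp [PySem.Set.add, PySem.Set.contains, hx]
    have h' : ((s ++ [x]) ++ xs).Nodup := by simpa using h
    calc PySem.Set.update s (x :: xs)
        = PySem.Set.update (PySem.Set.add s x) xs := by simp [PySem.Set.update]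
      _ = (s ++ [x]) ++ xs := by rw [hadd]; exact ih _ h'
      _ = s ++ x :: xs := by simp

-- the two halves occupy disjoint ranges of first coordinates
theorem append_shift_nodup (la lb : List (Int × Int)) (m : Int)
    (hla : la.Nodup) (hba : ∀ p ∈ la, 0 ≤ p.1 ∧ p.1 + 1 ≤ m)
    (hlb : lb.Nodup) (hbb : ∀ p ∈ lb, 0 ≤ p.1 ∧ p.1 + 1 ≤ m) :
    (la ++ lb.map (fun p => (p.1 + m, p.2))).Nodup := by
  have hinj : Function.Injective (fun p : Int × Int => (p.1 + m, p.2)) := by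
    intro p q hpq
    simp only [Prod.mk.injEq] at hpq
    exact Prod.ext (by omega) hpq.2
  refine List.Nodup.append hla (hlb.map hinj) ?_
  rw [List.disjoint_left]
  intro p hp hq
  rcases List.mem_map.mp hq with ⟨q, hq', rfl⟩
  have h1 := hba _ hp
  have h2 := hbb q hq'
  omega

-- hence the union+comprehension in a merge step is a plain append
theorem union_shift_eq_append (la lb : List (Int × Int)) (m : Int)
    (hla : la.Nodup) (hba : ∀ p ∈ la, 0 ≤ p.1 ∧ p.1 + 1 ≤ m)
    (hlb : lb.Nodup) (hbb : ∀ p ∈ lb, 0 ≤ p.1 ∧ p.1 + 1 ≤ m) :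
    PySem.Set.union la (PySem.Set.ofList (lb.map (fun p => (p.1 + m, p.2))))
      = la ++ lb.map (fun p => (p.1 + m, p.2)) := by
  have hinj : Function.Injective (fun p : Int × Int => (p.1 + m, p.2)) := by
    intro p q hpq
    simp only [Prod.mk.injEq] at hpq
    exact Prod.ext (by omega) hpq.2
  rw [PySem.Set.ofList_eq_self_of_nodup _ (hlb.map hinj)]
  exact update_eq_append _ _ (append_shift_nodup la lb m hla hba hlb hbb)

-- unfolding A's step (zeta-reduced body of genDlineA at fuel+1)
theorem genDlineA_succ (fuel : Nat) (n h ds : Int) :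
    genDlineA (fuel+1) n h ds =
      if n = 1 then [(0, h)]
      else if PySem.Int.mod ds 2 = 0 then
        PySem.Set.union (genDlineA fuel (PySem.Int.floordiv n 2) h (PySem.Int.floordiv ds 2))
          (PySem.Set.ofList ((genDlineA fuel (PySem.Int.floordiv n 2)
              (h + PySem.Int.floordiv ds 2) (PySem.Int.floordiv ds 2)).map
            (fun p => (p.1 + PySem.Int.floordiv n 2, p.2))))
      else
        PySem.Set.union (genDlineA fuel (PySem.Int.floordiv n 2) h (PySem.Int.floordiv (ds - 1) 2))
          (PySem.Set.ofList ((genDlineA fuel (PySem.Int.floordiv n 2)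
              (h + PySem.Int.floordiv (ds - 1) 2 + 1) (PySem.Int.floordiv (ds - 1) 2)).map
            (fun p => (p.1 + PySem.Int.floordiv n 2, p.2)))) := rfl

-- the depth-first point list of the tree described by a parameter list
def dfsPts : List (Int × Int) → Int → List (Int × Int)
  | [], v => [(0, v)]
  | (half, rise) :: rest, v =>
    dfsPts rest v ++ (dfsPts rest (v + rise)).map (fun p => (p.1 + half, p.2))

def maxIdx : List (Int × Int) → Int
  | [] => 0
  | (half, _) :: rest => half + maxIdx rest

-- well-formed parameter lists: each shift exceeds the whole reach of the deeper levels
def WFp : List (Int × Int) → Prop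
  | [] => True
  | (half, _) :: rest => maxIdx rest < half ∧ WFp rest

theorem dfsPts_inv (params : List (Int × Int)) (hwf : WFp params) : ∀ (v : Int),
    (dfsPts params v).Nodup ∧ ∀ p ∈ dfsPts params v, 0 ≤ p.1 ∧ p.1 ≤ maxIdx params := by
  induction params with
  | nil => intro v; simp [dfsPts, maxIdx]
  | cons pr rest ih =>
    obtain ⟨half, rise⟩ := pr
    obtain ⟨hlt, hwf'⟩ := hwf
    intro v
    obtain ⟨hnl, hbl⟩ := ih hwf' v
    obtain ⟨hnr, hbr⟩ := ih hwf' (v + rise)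
    have hbl' : ∀ p ∈ dfsPts rest v, 0 ≤ p.1 ∧ p.1 + 1 ≤ half := by
      intro p hp; have := hbl p hp; omega
    have hbr' : ∀ p ∈ dfsPts rest (v + rise), 0 ≤ p.1 ∧ p.1 + 1 ≤ half := by
      intro p hp; have := hbr p hp; omega
    refine ⟨append_shift_nodup _ _ _ hnl hbl' hnr hbr', ?_⟩
    intro p hp
    rcases List.mem_append.mp hp with hp | hp
    · have := hbl p hp
      show 0 ≤ p.1 ∧ p.1 ≤ half + maxIdx rest
      omega
    · rcases List.mem_map.mp hp with ⟨q, hq', rfl⟩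
      have := hbr q hq'
      refine ⟨?_, ?_⟩ <;> · show _ ≤ _; simp only [maxIdx]; omega

theorem dfsPts_union (half rise : Int) (rest : List (Int × Int)) (hwf : WFp ((half, rise) :: rest))
    (v : Int) :
    PySem.Set.union (dfsPts rest v)
      (PySem.Set.ofList ((dfsPts rest (v + rise)).map (fun p => (p.1 + half, p.2))))
      = dfsPts ((half, rise) :: rest) v := by
  obtain ⟨hlt, hwf'⟩ := hwf
  obtain ⟨hnl, hbl⟩ := dfsPts_inv rest hwf' v
  obtain ⟨hnr, hbr⟩ := dfsPts_inv rest hwf' (v + rise)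
  have hbl' : ∀ p ∈ dfsPts rest v, 0 ≤ p.1 ∧ p.1 + 1 ≤ half := by
    intro p hp; have := hbl p hp; omega
  have hbr' : ∀ p ∈ dfsPts rest (v + rise), 0 ≤ p.1 ∧ p.1 + 1 ≤ half := by
    intro p hp; have := hbr p hp; omega
  rw [union_shift_eq_append _ _ _ hnl hbl' hnr hbr']
  rfl

-- the parameter lists genParams produces are well-formed, with reach at most m - 1
theorem genParams_wf (fuel : Nat) : ∀ (m d : Int), 1 ≤ m →
    maxIdx (genParams fuel m d) ≤ m - 1 ∧ WFp (genParams fuel m d) := by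
  induction fuel with
  | zero => intro m d h1; simp [genParams, maxIdx, WFp]; omega
  | succ fuel ih =>
    intro m d h1
    by_cases hm : 1 < m
    · have hfd : PySem.Int.floordiv m 2 = m / 2 := PySem.Int.floordiv_eq_ediv_of_pos (by omega)
      have hh1 : 1 ≤ PySem.Int.floordiv m 2 := by rw [hfd]; omega
      have hh2 : 2 * PySem.Int.floordiv m 2 ≤ m := by rw [hfd]; omega
      obtain ⟨hb, hw⟩ := ih (PySem.Int.floordiv m 2) (PySem.Int.floordiv d 2) hh1
      rw [show genParams (fuel+1) m d
          = (PySem.Int.floordiv m 2, -(PySem.Int.floordiv (-d) 2))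
              :: genParams fuel (PySem.Int.floordiv m 2) (PySem.Int.floordiv d 2) from by
        rw [genParams]; rw [if_pos hm]]
      refine ⟨?_, ?_, hw⟩
      · show PySem.Int.floordiv m 2 + _ ≤ m - 1; omega
      · show maxIdx _ < PySem.Int.floordiv m 2; omega
    · rw [show genParams (fuel+1) m d = [] from by rw [genParams]; rw [if_neg hm]]
      exact ⟨by simp [maxIdx]; omega, trivial⟩

theorem WFp_tail (params : List (Int × Int)) (h : WFp params) : WFp params.tail := by
  cases params with
  | nil => trivial
  | cons pr rest => obtain ⟨half, rise⟩ := pr; exact h.2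

theorem WFp_drop (params : List (Int × Int)) (h : WFp params) : ∀ (d : Nat), WFp (params.drop d) := by
  intro d
  induction d with
  | zero => exact h
  | succ d ih =>
    rw [← List.tail_drop]
    exact WFp_tail _ ih

-- A's recursion produces exactly the depth-first point list of its parameter tree
theorem genDlineA_eq_dfs (fuel : Nat) : ∀ (n h ds : Int), 1 ≤ n → n ≤ (fuel : Int) →
    genDlineA fuel n h ds = dfsPts (genParams fuel n ds) h := by
  induction fuel with
  | zero =>
    intro n h ds h1 h2
    exfalso
    have : ((0:Nat):Int) = 0 := rfl
    omega
  | succ fuel ih =>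
    intro n h ds h1 h2
    by_cases hn : n = 1
    · subst hn
      rw [genDlineA_succ, if_pos rfl,
        show genParams (fuel+1) 1 ds = [] from by rw [genParams]; rw [if_neg (by omega)]]
      rfl
    · have hn2 : 2 ≤ n := by omega
      have hgt : (1:Int) < n := by omega
      have hfd : PySem.Int.floordiv n 2 = n / 2 := PySem.Int.floordiv_eq_ediv_of_pos (by omega)
      have hm1 : 1 ≤ PySem.Int.floordiv n 2 := by rw [hfd]; omega
      have hm2 : PySem.Int.floordiv n 2 ≤ (fuel : Int) := by
        rw [hfd]; push_cast at h2 ⊢; omega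
      have hP : genParams (fuel+1) n ds
          = (PySem.Int.floordiv n 2, -(PySem.Int.floordiv (-ds) 2))
              :: genParams fuel (PySem.Int.floordiv n 2) (PySem.Int.floordiv ds 2) := by
        rw [genParams]; rw [if_pos hgt]
      rw [hP, genDlineA_succ, if_neg hn]
      have hwf : WFp ((PySem.Int.floordiv n 2, -(PySem.Int.floordiv (-ds) 2))
          :: genParams fuel (PySem.Int.floordiv n 2) (PySem.Int.floordiv ds 2)) := by
        obtain ⟨hb, hw⟩ := genParams_wf fuel (PySem.Int.floordiv n 2) (PySem.Int.floordiv ds 2) hm1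
        exact ⟨by omega, hw⟩
      by_cases hds : PySem.Int.mod ds 2 = 0
      · have hs : PySem.Int.floordiv ds 2 = -(PySem.Int.floordiv (-ds) 2) := by
          rw [PySem.Int.floordiv_eq_ediv_of_pos (a := ds) (by omega),
              PySem.Int.floordiv_eq_ediv_of_pos (a := -ds) (by omega)]
          rw [PySem.Int.mod_eq_emod_of_pos (by omega)] at hds
          omega
        rw [if_pos hds, ih _ h _ hm1 hm2, ih _ (h + PySem.Int.floordiv ds 2) _ hm1 hm2,
          ← dfsPts_union _ _ _ hwf h]
        rw [show h + PySem.Int.floordiv ds 2 = h + -(PySem.Int.floordiv (-ds) 2) from by omega]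
      · have hmod : ds % 2 = 1 := by
          rw [PySem.Int.mod_eq_emod_of_pos (by omega)] at hds
          omega
        have hs1 : PySem.Int.floordiv (ds - 1) 2 = PySem.Int.floordiv ds 2 := by
          rw [PySem.Int.floordiv_eq_ediv_of_pos (a := ds - 1) (by omega),
              PySem.Int.floordiv_eq_ediv_of_pos (a := ds) (by omega)]
          omega
        have hs2 : h + PySem.Int.floordiv ds 2 + 1 = h + -(PySem.Int.floordiv (-ds) 2) := by
          rw [PySem.Int.floordiv_eq_ediv_of_pos (a := ds) (by omega),
              PySem.Int.floordiv_eq_ediv_of_pos (a := -ds) (by omega)]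
          omega
        rw [if_neg hds, hs1, ih _ h _ hm1 hm2, ih _ (h + PySem.Int.floordiv ds 2 + 1) _ hm1 hm2,
          hs2, ← dfsPts_union _ _ _ hwf h]

-- expandHs distributes over concatenation of start-height lists
theorem expandHs_append (params : List (Int × Int)) : ∀ (xs ys : List Int),
    expandHs params (xs ++ ys) = expandHs params xs ++ expandHs params ys := by
  induction params with
  | nil => intro xs ys; rfl
  | cons pr rest ih =>
    intro xs ys
    show expandHs rest ((xs ++ ys).flatMap _) = _
    rw [List.flatMap_append, ih]
    rfl

-- the top of the stack is at most depth d
def topLe (S : List (Nat × List (Int × Int))) (d : Nat) : Prop :=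
  match S with
  | [] => True
  | (d', _) :: _ => d' ≤ d

theorem collapseB_no_pop (params : List (Int × Int)) (S : List (Nat × List (Int × Int)))
    (depth : Nat) (node : List (Int × Int))
    (h : match S with | [] => True | (d', _) :: _ => d' ≠ depth) :
    collapseB params S depth node = (depth, node) :: S := by
  cases S with
  | nil => rfl
  | cons e stk =>
    obtain ⟨d', a⟩ := e
    exact if_neg h

-- one stack sweep over the leaf heights of the depth-d subtree equals pushing that
-- subtree's finished point set
theorem loop_block (ps : List (Int × Int)) (hwf : WFp ps) (bottom : Int)
    (hb : bottom = (ps.getD (ps.length - 1) ((0 : Int), (0 : Int))).1) :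
    ∀ (k d : Nat), d + k + 1 = ps.length → ∀ (v : Int) (S : List (Nat × List (Int × Int)))
      (rest : List Int), topLe S d →
    dlineLoopB ps bottom (ps.length - 1) (expandHs (ps.drop d) [v] ++ rest) S
      = dlineLoopB ps bottom (ps.length - 1) rest (collapseB ps S d (dfsPts (ps.drop d) v)) := by
  intro k
  induction k with
  | zero =>
    intro d hd v S rest hS
    have hdl : d < ps.length := by omega
    have hdrop : ps.drop d = ps[d] :: ps.drop (d + 1) := List.drop_eq_getElem_cons hdl
    have hnil : ps.drop (d + 1) = [] := List.drop_eq_nil_of_le (by omega)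
    have hone : ps.drop d = [ps[d]] := by rw [hdrop, hnil]
    have hbd : bottom = ps[d].1 := by
      rw [hb, show ps.length - 1 = d from by omega, List.getD_eq_getElem?_getD,
        List.getElem?_eq_getElem hdl]
      rfl
    have hexp : expandHs (ps.drop d) [v] = [v, v + ps[d].2] := by
      rw [hone]
      show ([v].flatMap fun w => [w, w + ps[d].2]) = _
      simp
    have hnode : PySem.Set.union [((0 : Int), v)] [(bottom, v + ps[d].2)]
        = dfsPts (ps.drop d) v := by
      rcases hpd : ps[d] with ⟨ph, pr⟩
      have h0 : (0:Int) < ph := by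
        have hwd : WFp (ps.drop d) := WFp_drop ps hwf d
        rw [hone, hpd] at hwd
        have := hwd.1
        simp only [maxIdx] at this
        omega
      have hbd' : bottom = ph := by rw [hbd, hpd]
      have happ : ([((0 : Int), v)] ++ [(bottom, v + pr)]).Nodup := by
        simp [Prod.ext_iff]
        omega
      rw [hone, hpd]
      show PySem.Set.update [((0 : Int), v)] [(bottom, v + pr)] = _
      rw [update_eq_append _ _ happ]
      simp [dfsPts]
      omega
    rw [hexp]
    show dlineLoopB ps bottom (ps.length - 1) rest
        (collapseB ps S (ps.length - 1) (PySem.Set.union [((0:Int), v)] [(bottom, v + ps[d].2)])) = _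
    rw [hnode, show ps.length - 1 = d from by omega]
  | succ k ih =>
    intro d hd v S rest hS
    have hdl : d < ps.length := by omega
    have hdrop : ps.drop d = ps[d] :: ps.drop (d + 1) := List.drop_eq_getElem_cons hdl
    have hexp : expandHs (ps.drop d) [v]
        = expandHs (ps.drop (d + 1)) [v] ++ expandHs (ps.drop (d + 1)) [v + ps[d].2] := by
      rw [hdrop]
      show expandHs (ps.drop (d + 1)) ([v].flatMap fun w => [w, w + ps[d].2]) = _
      have : ([v].flatMap fun w => [w, w + ps[d].2]) = [v] ++ [v + ps[d].2] := by simp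
      rw [this, expandHs_append]
    rw [hexp, List.append_assoc,
      ih (d + 1) (by omega) v S _ (by cases S with
        | nil => trivial
        | cons e stk => obtain ⟨d', a⟩ := e; show d' ≤ d + 1; have : d' ≤ d := hS; omega),
      collapseB_no_pop ps S (d + 1) _ (by cases S with
        | nil => trivial
        | cons e stk => obtain ⟨d', a⟩ := e; show d' ≠ d + 1; have : d' ≤ d := hS; omega),
      ih (d + 1) (by omega) (v + ps[d].2) _ rest (by show d + 1 ≤ d + 1; omega)]
    congr 1
    show (if d + 1 = d + 1 then _ else _) = _
    rw [if_pos rfl]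
    have hgd : (ps.getD d ((0 : Int), (0 : Int))) = ps[d] := by
      rw [List.getD_eq_getElem?_getD, List.getElem?_eq_getElem hdl]
      rfl
    simp only [Nat.add_sub_cancel]
    rw [hgd]
    congr 1
    have hwd : WFp (ps.drop d) := WFp_drop ps hwf d
    rw [hdrop] at hwd
    have hwd' : WFp ((ps[d].1, ps[d].2) :: ps.drop (d + 1)) := by
      rwa [show (ps[d].1, ps[d].2) = ps[d] from rfl]
    have := dfsPts_union ps[d].1 ps[d].2 (ps.drop (d + 1)) hwd' v
    rw [hdrop]
    exact this

-- ===== VERDICT (by name: the statement is the Claim_ definition above) =====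
theorem gen_dline_py_spec : Claim_equal_gen_dline_py := by
  intro n h ds _ hpre
  have h1 : 1 ≤ n := hpre
  have h2 : n ≤ (n.toNat : Int) := by omega
  show gen_dline_py n h ds = gen_dline_py_alt n h ds
  unfold gen_dline_py gen_dline_py_alt
  rw [genDlineA_eq_dfs n.toNat n h ds h1 h2]
  by_cases hp : genParams n.toNat n ds = []
  · rw [if_pos hp, hp]
    rfl
  · rw [if_neg hp]
    have hwf : WFp (genParams n.toNat n ds) := (genParams_wf n.toNat n ds h1).2
    have hlen : 1 ≤ (genParams n.toNat n ds).length := by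
      cases hq : genParams n.toNat n ds with
      | nil => exact absurd hq hp
      | cons a l => simp
    have hbl : ((genParams n.toNat n ds).getLastD ((0:Int),(0:Int)))
        = (genParams n.toNat n ds).getD ((genParams n.toNat n ds).length - 1) ((0:Int),(0:Int)) := by
      rw [List.getLastD_eq_getLast?, List.getLast?_eq_getElem?, List.getD_eq_getElem?_getD]
    have hmain := loop_block (genParams n.toNat n ds) hwf
      ((genParams n.toNat n ds).getLastD ((0:Int),(0:Int))).1 (by rw [hbl])
      ((genParams n.toNat n ds).length - 1) 0 (by omega) h [] [] trivial
    rw [List.drop_zero, List.append_nil] at hmain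
    show dfsPts (genParams n.toNat n ds) h
        = (match dlineLoopB (genParams n.toNat n ds)
            ((genParams n.toNat n ds).getLastD ((0:Int),(0:Int))).1
            ((genParams n.toNat n ds).length - 1)
            (expandHs (genParams n.toNat n ds) [h]) [] with
          | (_, s) :: _ => s
          | [] => [])
    rw [hmain]
    rfl
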